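-- pv_equiv track=rewrite | github.com/hope1053/algorithm_practice | 프로그래머스 level 2/n진수 게임.py | solution
-- ===== SOURCE A (Python) =====
-- def solution(n, t, m, p):
--     result, answer = list(), str()
--     for num in range(0,t*m):
--         a, b = -1, -1
--         temp = list()
--         while a != 0:
--             a, b = divmod(num, n)
--             if n > 10 and b >= 10:
--                 b = chr(b - 10 + ord('A'))
--             temp = [b] + temp
--             num = a
--         result.extend(temp)
--         if len(result) > t * m:
--             break
--
--     for idx in range(len(result)):
--         if (idx + 1 - p) % m == 0:
--             answer += str(result[idx])
--         if len(answer) == t: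
--             break
--
--     return answer
-- ===== SOURCE B (Python) =====
-- def _digit_str(n, b):
--     return chr(b - 10 + ord('A')) if n > 10 and b >= 10 else str(b)
--
--
-- def _digit_at(n, j):
--     # j-th character (0-based) of the concatenation of base-n representations of 0,1,2,...
--     if j < n:
--         return _digit_str(n, j)
--     c = n          # characters contributed by the 1-digit numbers 0..n-1
--     d = 1
--     pw = 1         # n^(d-1)
--     while True:
--         d += 1
--         pw *= n
--         cnt = pw * n - pw          # how many d-digit numbers there are
--         if c + d * cnt > j:
--             break
--         c += d * cnt
--     off = j - c
--     num = pw + off // d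
--     i = off % d
--     return _digit_str(n, num // n ** (d - 1 - i) % n)
--
--
-- def solution(n, t, m, p):
--     start = (p - 1) % m            # player p's first position on the board
--     return "".join(_digit_at(n, start + k * m) for k in range(t))
-- ===== Notes on version B (the rewrite author's own statement) =====
-- stated objective: faster
-- what changed: B never materialises the t*m-character game board: it computes each of player p's t digit positions (p-1)%m + k*m directly by Champernowne-style digit extraction (cumulative base-n digit counts locate the number and the digit inside it). …
-- outside the precondition, e.g. on solution(3, 2, -2, 1): A returns '', B returns '0-2'; on solution(2, -2, -2, 1): A returns '011', B returns ''; on solution(-5, 2, 1, 1): A returns '0-1-4', B returns '-30'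
import Mathlib
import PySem

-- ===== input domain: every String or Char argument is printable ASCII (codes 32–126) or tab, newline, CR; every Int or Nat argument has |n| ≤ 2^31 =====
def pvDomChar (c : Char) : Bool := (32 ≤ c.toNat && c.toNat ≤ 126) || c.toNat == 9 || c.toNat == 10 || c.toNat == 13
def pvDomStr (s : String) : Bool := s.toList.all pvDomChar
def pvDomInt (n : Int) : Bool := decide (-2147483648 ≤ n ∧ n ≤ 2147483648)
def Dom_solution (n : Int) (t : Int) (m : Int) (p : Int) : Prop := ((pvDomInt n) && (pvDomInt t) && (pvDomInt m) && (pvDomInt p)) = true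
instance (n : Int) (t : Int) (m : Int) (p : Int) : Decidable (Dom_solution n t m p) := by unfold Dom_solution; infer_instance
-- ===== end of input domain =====

-- B never builds the t*m-character game board: it extracts each of player p's t digits directly
-- by Champernowne-style positional digit extraction (objective: faster).

-- ===== PORT A =====

/-- Python's heterogeneous list elements: ints, or the chars produced by `chr`. -/
inductive PyVal
  | i : Int → PyVal
  | c : Char → PyVal
deriving DecidableEq, Repr

/-- `str(v)` on an element of A's `result` list. -/
def pyStrOfVal : PyVal → List Char
  | .i z => PySem.Int.toChars z
  | .c ch => [ch]

/-- A's inner `while a != 0` loop: one divmod per step, prepending the digit to `temp`.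
Fuel-driven; the fuel passed by `solution` covers every terminating run (Python diverges
for n = ±1 and raises for n = 0 — excluded by `Pre_`; there the port just stops). -/
def aDigits (n : Int) : Nat → Int → List PyVal → List PyVal
  | 0, _, temp => temp
  | fuel + 1, num, temp =>
    match PySem.Int.divmod? num n with
    | none => temp            -- Python: ZeroDivisionError (n = 0), excluded by Pre_
    | some (a, b) =>
      -- chr(b - 10 + ord('A')): exact for 0 ≤ b-10+65 < 0xD800, which Pre_ guarantees
      let bv : PyVal := if 10 < n ∧ 10 ≤ b then PyVal.c (Char.ofNat (b - 10 + 65).toNat) else PyVal.i b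
      let temp' := bv :: temp
      if a ≠ 0 then aDigits n fuel a temp' else temp'

/-- A's first loop: `for num in range(0, t*m): … result.extend(temp); if len(result) > t*m: break`. -/
def aOuter (n T : Int) (num : Int) (result : List PyVal) : List PyVal :=
  if h : num < T then
    let temp := aDigits n (num.natAbs + 2) num []
    let result' := result ++ temp
    if (result'.length : Int) > T then result'
    else aOuter n T (num + 1) result'
  else result
termination_by (T - num).toNat
decreasing_by omega

/-- A's second loop: scan `result`, appending `str(result[idx])` when `(idx+1-p) % m == 0`,
breaking when `len(answer) == t`. -/
def aScan (m p t : Int) (res : List PyVal) (idx : Int) (ans : List Char) : List Char :=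
  if h : idx < (res.length : Int) then
    let ans' := if PySem.Int.mod (idx + 1 - p) m = 0
                then ans ++ pyStrOfVal (PySem.List.pyGetD res idx (PyVal.i 0))
                else ans
    if (ans'.length : Int) = t then ans'
    else aScan m p t res (idx + 1) ans'
  else ans
termination_by ((res.length : Int) - idx).toNat
decreasing_by omega

def solution (n : Int) (t : Int) (m : Int) (p : Int) : String :=
  let result := aOuter n (t * m) 0 []
  String.ofList (aScan m p t result 0 [])

-- ===== PORT B =====

/-- digit → character: `chr(b - 10 + ord('A')) if n > 10 and b >= 10 else str(b)`. -/
def bDigitStr (n b : Int) : List Char :=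
  if 10 < n ∧ 10 ≤ b then [Char.ofNat (b - 10 + 65).toNat] else PySem.Int.toChars b

/-- B's block walk inside `_digit_at` (`while True: d += 1; pw *= n; …`), fuel-driven
(128 covers every input admitted by `Dom`/`Pre_`). Returns (c, d, pw = n^(d-1)). -/
def bBlock (n j : Int) : Nat → Int → Int → Int → Int × Int × Int
  | 0, c, d, pw => (c, d, pw)
  | fuel + 1, c, d, pw =>
    let d' := d + 1
    let pw' := pw * n
    let cnt := pw' * n - pw'
    if c + d' * cnt > j then (c, d', pw')
    else bBlock n j fuel (c + d' * cnt) d' pw'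

/-- B's `_digit_at`: the j-th character of `"".join(base-n reps of 0,1,2,…)`. -/
def bDigitAt (n j : Int) : List Char :=
  if j < n then bDigitStr n j
  else
    let (c, d, pw) := bBlock n j 128 n 1 1
    let off := j - c
    let num := pw + PySem.Int.floordiv off d
    let i := PySem.Int.mod off d
    bDigitStr n (PySem.Int.mod (PySem.Int.floordiv num (n ^ (d - 1 - i).toNat)) n)

def solution_alt (n : Int) (t : Int) (m : Int) (p : Int) : String :=
  let start := PySem.Int.mod (p - 1) m
  String.ofList (((PySem.List.pyRange 0 t 1).map (fun k => bDigitAt n (start + k * m))).flatten)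

-- ===== PRECONDITION & SPEC =====

-- Pre_ admits m ≥ 1 with any player number p (t ≤ 0 gives the empty game, t ≥ 1 needs a real
-- base n ≥ 2), plus the empty t = 0 game for negative m.  Excluded: m ≥ 1, t ≥ 1 with n < 2
-- (A raises ZeroDivisionError for n = 0, diverges for n = ±1, and for n ≤ -2 emits divmod's
-- negative "digits" — outside any base-n game); m < 0 with t ≠ 0 (A's scan over its
-- accidentally overshot board is a corner no one would specify); and 55242 ≤ n with
-- 55242 ≤ t*m, where A's chr(b-10+ord('A')) can yield lone surrogates — strings Lean
-- cannot represent — or raise ValueError past 0x10FFFF.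
def Pre_solution (n : Int) (t : Int) (m : Int) (p : Int) : Prop :=
  (1 ≤ m ∧ t ≤ 0) ∨ (1 ≤ m ∧ 1 ≤ t ∧ 2 ≤ n ∧ ¬(55242 ≤ n ∧ 55242 ≤ t * m)) ∨ (t = 0 ∧ m ≤ -1)

instance (n : Int) (t : Int) (m : Int) (p : Int) : Decidable (Pre_solution n t m p) := by
  unfold Pre_solution; infer_instance

def pvWitness_solution : Int × Int × Int × Int := (2, 4, 2, 1)

def Spec_solution (n : Int) (t : Int) (m : Int) (p : Int) (out : String) : Prop := out = solution_alt n t m p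
instance (n : Int) (t : Int) (m : Int) (p : Int) (out : String) : Decidable (Spec_solution n t m p out) := by unfold Spec_solution; infer_instance

-- ===== CLAIM (what is proved, stated in full; the proofs are below) =====
def Claim_equal_solution : Prop := ∀ (n : Int) (t : Int) (m : Int) (p : Int), Dom_solution n t m p → Pre_solution n t m p → Spec_solution n t m p (solution n t m p)

-- ===== LEMMAS AND PROOFS =====

def pdigs (N k : ℕ) : List ℕ := if k = 0 then [0] else (Nat.digits N k).reverse
def pdlen (N k : ℕ) : ℕ := (pdigs N k).length
def pcum (N K : ℕ) : ℕ := ((List.range K).map (pdlen N)).sum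
def pstream (N K : ℕ) : List ℕ := (List.range K).flatMap (pdigs N)
def sval (N j : ℕ) : ℕ := (pstream N (j + 1)).getD j 0
def kStop (N TT : ℕ) : ℕ := Nat.find (p := fun K => TT ≤ K ∨ TT < pcum N K) ⟨TT, Or.inl le_rfl⟩

/-- How A stores one digit value in `result`. -/
def encV (N b : ℕ) : PyVal := if 10 < N ∧ 10 ≤ b then PyVal.c (Char.ofNat (b + 55)) else PyVal.i ↑b

lemma pdigs_small {N k : ℕ} (hN : 2 ≤ N) (hk : k < N) : pdigs N k = [k] := by
  rcases Nat.eq_zero_or_pos k with h | h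
  · simp [pdigs, h]
  · unfold pdigs
    rw [if_neg (by omega), Nat.digits_def' (by omega : 1 < N) h,
      Nat.mod_eq_of_lt hk, Nat.div_eq_of_lt hk]
    simp

lemma pdigs_step {N k : ℕ} (hN : 2 ≤ N) (hk : N ≤ k) :
    pdigs N k = pdigs N (k / N) ++ [k % N] := by
  have hk0 : k ≠ 0 := by omega
  have hdiv : k / N ≠ 0 := by
    have := (Nat.one_le_div_iff (by omega : 0 < N)).mpr hk; omega
  simp [pdigs, hk0, hdiv, Nat.digits_def' (by omega : 1 < N) (by omega : 0 < k)]

lemma pdlen_pos (N k : ℕ) : 0 < pdlen N k := by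
  unfold pdlen pdigs
  split
  · simp
  · rw [List.length_reverse]
    exact List.length_pos_iff.mpr (Nat.digits_ne_nil_iff_ne_zero.mpr (by assumption))

lemma pdlen_eq {N d k : ℕ} (hN : 2 ≤ N) (hd : 1 ≤ d) (h1 : N ^ (d - 1) ≤ k) (h2 : k < N ^ d) :
    pdlen N k = d := by
  have hk0 : k ≠ 0 := by
    have : 0 < N ^ (d - 1) := Nat.pow_pos (by omega)
    omega
  unfold pdlen pdigs
  rw [if_neg hk0, List.length_reverse, Nat.digits_len _ _ (by omega) hk0,
    Nat.log_eq_of_pow_le_of_lt_pow h1 (by rwa [Nat.sub_add_cancel hd])]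
  omega

lemma pcum_succ (N K : ℕ) : pcum N (K + 1) = pcum N K + pdlen N K := by
  simp [pcum, List.range_succ]

lemma pcum_mono (N : ℕ) {K K' : ℕ} (h : K ≤ K') : pcum N K ≤ pcum N K' := by
  induction K', h using Nat.le_induction with
  | base => exact le_rfl
  | succ K' h ih => rw [pcum_succ]; omega

lemma le_pcum (N K : ℕ) : K ≤ pcum N K := by
  induction K with
  | zero => simp [pcum]
  | succ K ih => have := pdlen_pos N K; rw [pcum_succ]; omega

lemma pcum_block {N d a : ℕ} (hN : 2 ≤ N) (hd : 1 ≤ d) (ha : N ^ (d - 1) ≤ a) :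
    ∀ j, a + j ≤ N ^ d → pcum N (a + j) = pcum N a + d * j := by
  intro j
  induction j with
  | zero => simp
  | succ j ih =>
    intro hj
    have hij := ih (by omega)
    rw [show a + (j + 1) = (a + j) + 1 by ring, pcum_succ, hij,
      pdlen_eq hN hd (by omega) (by omega)]
    ring

lemma pcum_single {N K : ℕ} (hN : 2 ≤ N) (h : K ≤ N) : pcum N K = K := by
  induction K with
  | zero => simp [pcum]
  | succ K ih =>
    rw [pcum_succ, ih (by omega)]
    have : pdigs N K = [K] := pdigs_small hN (by omega)
    simp [pdlen, this]

lemma pstream_succ (N K : ℕ) : pstream N (K + 1) = pstream N K ++ pdigs N K := by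
  simp [pstream, List.range_succ]

lemma length_pstream (N K : ℕ) : (pstream N K).length = pcum N K := by
  induction K with
  | zero => simp [pstream, pcum]
  | succ K ih => rw [pstream_succ, pcum_succ, List.length_append, ih]; rfl

lemma pstream_prefix (N : ℕ) {K K' : ℕ} (h : K ≤ K') : pstream N K <+: pstream N K' := by
  induction K', h using Nat.le_induction with
  | base => exact List.prefix_refl _
  | succ K' h ih => rw [pstream_succ]; exact ih.trans (List.prefix_append _ _)

lemma prefix_getD {l l' : List ℕ} (h : l <+: l') {j : ℕ} (hj : j < l.length) :
    l.getD j 0 = l'.getD j 0 := by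
  obtain ⟨r, rfl⟩ := h
  rw [List.getD_eq_getElem _ _ hj, List.getD_eq_getElem _ _ (by simp; omega),
    List.getElem_append_left hj]

lemma pstream_getD {N k K i : ℕ} (hk : k < K) (hi : i < pdlen N k) :
    (pstream N K).getD (pcum N k + i) 0 = (pdigs N k).getD i 0 := by
  have hlen : pcum N k + i < (pstream N (k + 1)).length := by
    rw [length_pstream, pcum_succ]; omega
  have hlen' : pcum N k + i < (pstream N k ++ pdigs N k).length := by
    rw [← pstream_succ]; exact hlen
  calc (pstream N K).getD (pcum N k + i) 0
      = (pstream N (k + 1)).getD (pcum N k + i) 0 :=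
        (prefix_getD (pstream_prefix N hk) hlen).symm
    _ = (pstream N k ++ pdigs N k).getD (pcum N k + i) 0 := by rw [pstream_succ]
    _ = (pdigs N k).getD i 0 := by
        rw [List.getD_eq_getElem _ _ hlen',
          List.getElem_append_right (by rw [length_pstream]; omega),
          List.getD_eq_getElem _ _ (by simpa [pdlen] using hi)]
        congr 1
        rw [length_pstream]
        omega

lemma pstream_getD_sval {N j K : ℕ} (hj : j < pcum N K) :
    (pstream N K).getD j 0 = sval N j := by
  unfold sval
  by_cases h : K ≤ j + 1
  · exact prefix_getD (pstream_prefix N h) (by rwa [length_pstream])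
  · exact (prefix_getD (pstream_prefix N (by omega : j + 1 ≤ K))
      (by rw [length_pstream]; have := le_pcum N (j + 1); omega)).symm

lemma digits_getD {N : ℕ} (hN : 2 ≤ N) :
    ∀ e k, e < (Nat.digits N k).length → (Nat.digits N k).getD e 0 = k / N ^ e % N := by
  intro e
  induction e with
  | zero =>
    intro k hk
    have hk0 : k ≠ 0 := by
      intro h; rw [h] at hk; simp at hk
    rw [Nat.digits_def' (by omega : 1 < N) (by omega)]
    simp
  | succ e ih =>
    intro k hk
    have hk0 : k ≠ 0 := by intro h; rw [h] at hk; simp at hk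
    rw [Nat.digits_def' (by omega : 1 < N) (by omega)] at hk ⊢
    simp only [List.getD_cons_succ]
    rw [ih _ (by simpa using hk), Nat.div_div_eq_div_mul, pow_succ']

lemma pdigs_getD {N k i : ℕ} (hN : 2 ≤ N) (hk : 1 ≤ k) (hi : i < pdlen N k) :
    (pdigs N k).getD i 0 = k / N ^ (pdlen N k - 1 - i) % N := by
  have hk0 : k ≠ 0 := by omega
  have hlen : pdlen N k = (Nat.digits N k).length := by simp [pdlen, pdigs, hk0]
  unfold pdigs
  rw [if_neg hk0]
  have hi' : i < (Nat.digits N k).reverse.length := by simpa [← hlen] using hi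
  rw [List.getD_eq_getElem _ _ hi', List.getElem_reverse]
  rw [← List.getD_eq_getElem _ 0, digits_getD hN _ _ (by simp at hi' ⊢; omega)]
  rw [hlen]

lemma mem_pstream_lt {N x : ℕ} (hN : 2 ≤ N) {K : ℕ} (hx : x ∈ pstream N K) : x < N := by
  unfold pstream at hx
  simp only [List.mem_flatMap] at hx
  obtain ⟨k, -, hk⟩ := hx
  unfold pdigs at hk
  split at hk
  · simp at hk; omega
  · exact Nat.digits_lt_base (by omega) (by simpa using hk)

lemma sval_lt {N j : ℕ} (hN : 2 ≤ N) : sval N j < N := by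
  have hj : j < (pstream N (j + 1)).length := by
    rw [length_pstream]; have := le_pcum N (j + 1); omega
  unfold sval
  rw [List.getD_eq_getElem _ _ hj]
  exact mem_pstream_lt hN (List.getElem_mem _)

lemma pstream_range {N K : ℕ} (hN : 2 ≤ N) (h : K ≤ N) : pstream N K = List.range K := by
  induction K with
  | zero => simp [pstream]
  | succ K ih =>
    rw [pstream_succ, ih (by omega), pdigs_small hN (by omega), List.range_succ]

lemma sval_small {N j : ℕ} (hN : 2 ≤ N) (hj : j < N) : sval N j = j := by
  unfold sval
  rw [pstream_range hN (by omega)]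
  simp

lemma kStop_eq_of {N TT K : ℕ} (hp : TT ≤ K ∨ TT < pcum N K)
    (hmin : ∀ i < K, i < TT ∧ pcum N i ≤ TT) : kStop N TT = K := by
  refine le_antisymm (Nat.find_le hp) ?_
  rw [kStop, Nat.le_find_iff]
  intro i hi
  push_neg
  exact ⟨(hmin i hi).1, (hmin i hi).2⟩

lemma le_pcum_kStop (N TT : ℕ) : TT ≤ pcum N (kStop N TT) := by
  unfold kStop
  rcases Nat.find_spec (p := fun K => TT ≤ K ∨ TT < pcum N K) ⟨TT, Or.inl le_rfl⟩ with h | h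
  · exact le_trans h (le_pcum N _)
  · omega

-- ===== A-side characterisation =====

lemma encV_int (N b : ℕ) :
    (if (10:ℤ) < (↑N:ℤ) ∧ (10:ℤ) ≤ (↑b:ℤ) then PyVal.c (Char.ofNat ((↑b:ℤ) - 10 + 65).toNat)
     else PyVal.i ↑b) = encV N b := by
  unfold encV
  by_cases h : 10 < N ∧ 10 ≤ b
  · rw [if_pos (by exact_mod_cast h), if_pos h]
    have hb : ((b:ℤ) - 10 + 65).toNat = b + 55 := by omega
    rw [hb]
  · rw [if_neg (by intro hc; exact h ⟨by exact_mod_cast hc.1, by exact_mod_cast hc.2⟩), if_neg h]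

lemma divmod_natCast {N k : ℕ} (hN : N ≠ 0) :
    PySem.Int.divmod? (↑k) (↑N) = some ((↑(k / N) : ℤ), (↑(k % N) : ℤ)) := by
  have hN0 : ((N : ℤ)) ≠ 0 := by exact_mod_cast hN
  have h1 : PySem.Int.divmod? (↑k) (↑N) =
      some (PySem.Int.floordiv ↑k ↑N, PySem.Int.mod ↑k ↑N) := by
    simp [PySem.Int.divmod?, PySem.Int.floordiv, PySem.Int.mod, hN]
  rw [h1, PySem.Int.floordiv_natCast, PySem.Int.mod_natCast]

lemma aDigits_spec {N : ℕ} (hN : 2 ≤ N) :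
    ∀ (k fuel : ℕ), k + 1 ≤ fuel → ∀ acc, aDigits (↑N) fuel (↑k) acc = (pdigs N k).map (encV N) ++ acc := by
  intro k
  induction k using Nat.strong_induction_on with
  | _ k ih =>
    intro fuel hf acc
    obtain ⟨fuel, rfl⟩ : ∃ f, fuel = f + 1 := ⟨fuel - 1, by omega⟩
    rw [aDigits, divmod_natCast (by omega)]
    simp only [encV_int]
    by_cases hk : k < N
    · have h0 : ((k / N : ℕ) : ℤ) = 0 := by rw [Nat.div_eq_of_lt hk]; rfl
      rw [if_neg (by simp [h0]), Nat.mod_eq_of_lt hk, pdigs_small hN hk]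
      simp
    · have hdiv : k / N ≠ 0 := by
        have := (Nat.one_le_div_iff (by omega : 0 < N)).mpr (by omega : N ≤ k)
        omega
      have hlt : k / N < k := Nat.div_lt_self (by omega) (by omega)
      rw [if_pos (by exact_mod_cast hdiv)]
      rw [ih (k / N) hlt fuel (Nat.succ_le_of_lt (lt_of_lt_of_le hlt (by omega))) (encV N (k % N) :: acc)]
      rw [pdigs_step hN (show N ≤ k by omega)]
      simp

lemma aOuter_spec {N TT : ℕ} (hN : 2 ≤ N) (hTT : 1 ≤ TT) :
    ∀ (fuel j : ℕ), TT - j = fuel → j < TT → pcum N j ≤ TT →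
      aOuter (↑N) (↑TT) (↑j) ((pstream N j).map (encV N)) = (pstream N (kStop N TT)).map (encV N) := by
  intro fuel
  induction fuel using Nat.strong_induction_on with
  | _ fuel ih =>
    intro j hfj hj hcum
    have hmin : ∀ i < j + 1, i < TT ∧ pcum N i ≤ TT := by
      intro i hi
      exact ⟨by omega, le_trans (pcum_mono N (by omega)) hcum⟩
    rw [aOuter, dif_pos (show (j : ℤ) < (TT : ℤ) by exact_mod_cast hj)]
    simp only [Int.natAbs_natCast]
    rw [aDigits_spec hN j (j + 2) (by omega) []]
    rw [List.append_nil, ← List.map_append, ← pstream_succ, List.length_map, length_pstream]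
    by_cases hbr : TT < pcum N (j + 1)
    · rw [if_pos (by exact_mod_cast hbr)]
      have hk : kStop N TT = j + 1 := kStop_eq_of (Or.inr hbr) hmin
      rw [hk]
    · rw [if_neg (by exact_mod_cast hbr)]
      by_cases hj1 : j + 1 < TT
      · have := ih (TT - (j + 1)) (by omega) (j + 1) rfl hj1 (by omega)
        rw [show ((j : ℤ) + 1) = ((j + 1 : ℕ) : ℤ) by push_cast; ring]
        exact this
      · have hjt : j + 1 = TT := by omega
        rw [aOuter, dif_neg (show ¬((j : ℤ) + 1 < (TT : ℤ)) by exact_mod_cast (by omega : ¬(j + 1 < TT)))]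
        have hk : kStop N TT = j + 1 := kStop_eq_of (Or.inl (by omega)) hmin
        rw [hk]

lemma toChars_digit {b : ℕ} (hb : b < 10) : PySem.Int.toChars (↑b) = [Char.ofNat (b + 48)] := by
  interval_cases b <;> rfl

lemma bDigitStr_encV {N b : ℕ} (hN : 2 ≤ N) :
    bDigitStr (↑N) (↑b) = pyStrOfVal (encV N b) := by
  unfold bDigitStr encV
  by_cases h : 10 < N ∧ 10 ≤ b
  · rw [if_pos (by exact_mod_cast h), if_pos h]
    simp only [pyStrOfVal]
    congr 2
    omega
  · rw [if_neg (by intro hc; exact h ⟨by exact_mod_cast hc.1, by exact_mod_cast hc.2⟩), if_neg h]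
    simp [pyStrOfVal]

lemma pyStrOfVal_encV_len {N b : ℕ} (hN : 2 ≤ N) (hb : b < N) :
    (pyStrOfVal (encV N b)).length = 1 := by
  unfold encV
  by_cases h : 10 < N ∧ 10 ≤ b
  · rw [if_pos h]
    simp [pyStrOfVal]
  · rw [if_neg h]
    have hb10 : b < 10 := by
      rcases Nat.lt_or_ge b 10 with h' | h'
      · exact h'
      · exact absurd ⟨by omega, h'⟩ h
    simp [pyStrOfVal, toChars_digit hb10]

-- ===== B-side characterisation =====

lemma bBlock_spec {N jj : ℕ} (hN : 2 ≤ N) :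
    ∀ fuel (dd : ℕ), 1 ≤ dd → jj < 2 ^ (dd + fuel) → pcum N (N ^ dd) ≤ jj →
      ∃ ee : ℕ, dd < ee ∧ pcum N (N ^ (ee - 1)) ≤ jj ∧ jj < pcum N (N ^ ee) ∧
        bBlock (↑N) (↑jj) fuel (↑(pcum N (N ^ dd))) (↑dd) (↑(N ^ (dd - 1))) =
          (↑(pcum N (N ^ (ee - 1))), ↑ee, ↑(N ^ (ee - 1))) := by
  intro fuel
  induction fuel with
  | zero =>
    intro dd hdd hjf hC
    simp only [Nat.add_zero] at hjf
    have h1 := le_pcum N (N ^ dd)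
    have h2 : 2 ^ dd ≤ N ^ dd := Nat.pow_le_pow_left hN dd
    omega
  | succ fuel ih =>
    intro dd hdd hjf hC
    have e2 : ((N ^ (dd - 1) : ℕ) : ℤ) * (N : ℤ) = ((N ^ dd : ℕ) : ℤ) := by
      rw [← Nat.cast_mul]
      congr 1
      rw [← pow_succ]
      congr 1
      omega
    have hle : N ^ dd ≤ N ^ (dd + 1) := Nat.pow_le_pow_right (by omega) (by omega)
    have e3 : ((N ^ dd : ℕ) : ℤ) * (N : ℤ) - ((N ^ dd : ℕ) : ℤ) = ((N ^ (dd + 1) - N ^ dd : ℕ) : ℤ) := by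
      push_cast [hle]
      rw [← pow_succ]
    have e4 : pcum N (N ^ dd) + (dd + 1) * (N ^ (dd + 1) - N ^ dd) = pcum N (N ^ (dd + 1)) := by
      have hblock := pcum_block hN (show 1 ≤ dd + 1 by omega)
        (show N ^ (dd + 1 - 1) ≤ N ^ dd by simp) (N ^ (dd + 1) - N ^ dd) (by omega)
      rw [show N ^ dd + (N ^ (dd + 1) - N ^ dd) = N ^ (dd + 1) by omega] at hblock
      omega
    have e5 : ((pcum N (N ^ dd) : ℕ) : ℤ) + ((dd : ℤ) + 1) * (((N ^ (dd - 1) : ℕ) : ℤ) * (N : ℤ) * (N : ℤ) - ((N ^ (dd - 1) : ℕ) : ℤ) * (N : ℤ)) = ((pcum N (N ^ (dd + 1)) : ℕ) : ℤ) := by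
      rw [show ((N ^ (dd - 1) : ℕ) : ℤ) * (N : ℤ) * (N : ℤ) - ((N ^ (dd - 1) : ℕ) : ℤ) * (N : ℤ)
            = ((N ^ dd : ℕ) : ℤ) * (N : ℤ) - ((N ^ dd : ℕ) : ℤ) by rw [e2], e3]
      rw [← e4]
      push_cast
      ring
    rw [bBlock]
    simp only [e5]
    by_cases hbr : jj < pcum N (N ^ (dd + 1))
    · rw [if_pos (by exact_mod_cast hbr)]
      refine ⟨dd + 1, by omega, by simpa using hC, by simpa using hbr, ?_⟩
      rw [show dd + 1 - 1 = dd by omega]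
      rw [show ((dd : ℤ) + 1) = ((dd + 1 : ℕ) : ℤ) by push_cast; ring, e2]
    · rw [if_neg (by exact_mod_cast hbr)]
      have hrec := ih (dd + 1) (by omega) (by rw [show dd + 1 + fuel = dd + (fuel + 1) by omega]; exact hjf) (by omega)
      rw [show dd + 1 - 1 = dd by omega] at hrec
      rw [show ((dd : ℤ) + 1) = ((dd + 1 : ℕ) : ℤ) by push_cast; ring, e2]
      obtain ⟨ee, h1, h2, h3, h4⟩ := hrec
      exact ⟨ee, by omega, h2, h3, h4⟩

lemma bDigitAt_spec {N jj : ℕ} (hN : 2 ≤ N) (hjj : jj < 2 ^ 120) :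
    bDigitAt (↑N) (↑jj) = bDigitStr (↑N) (↑(sval N jj)) := by
  rw [bDigitAt]
  by_cases hsm : jj < N
  · rw [if_pos (by exact_mod_cast hsm), sval_small hN hsm]
  · rw [if_neg (by exact_mod_cast hsm)]
    obtain ⟨ee, hee, hlow, hhigh, hb⟩ := bBlock_spec hN 128 1 le_rfl
      (by calc jj < 2 ^ 120 := hjj
            _ ≤ 2 ^ (1 + 128) := Nat.pow_le_pow_right (by omega) (by omega))
      (by rw [pow_one, pcum_single hN le_rfl]; omega)
    rw [show pcum N (N ^ 1) = N by rw [pow_one]; exact pcum_single hN le_rfl] at hb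
    rw [show N ^ (1 - 1) = 1 by norm_num] at hb
    rw [show ((1 : ℕ) : ℤ) = (1 : ℤ) by norm_num] at hb
    rw [hb]
    have hee1 : 1 ≤ ee := by omega
    have heepos : 0 < ee := by omega
    set P : ℕ := N ^ (ee - 1) with hP
    set C : ℕ := pcum N P with hC
    set off : ℕ := jj - C with hoff
    set q : ℕ := off / ee with hq
    set r : ℕ := off % ee with hr
    clear_value P C off q r
    have hrlt : r < ee := by rw [hr]; exact Nat.mod_lt _ heepos
    have hdm : ee * q + r = off := by rw [hq, hr]; exact Nat.div_add_mod off ee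
    have hPpow : N ^ ((ee - 1) + 1) = N ^ ee := by congr 1; omega
    have hblock : ∀ x, P + x ≤ N ^ ee →
        pcum N (P + x) = C + ee * x := by
      intro x hx
      have h9 := pcum_block hN hee1 hP.ge x hx
      rw [← hC] at h9
      exact h9
    have hfull : pcum N (N ^ ee) = C + ee * (N ^ ee - P) := by
      have hPle : P ≤ N ^ ee := by
        rw [hP]; exact Nat.pow_le_pow_right (by omega) (by omega)
      have := hblock (N ^ ee - P) (by omega)
      rw [show P + (N ^ ee - P) = N ^ ee by omega] at this
      exact this
    have hPle : P ≤ N ^ ee := by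
      rw [hP]; exact Nat.pow_le_pow_right (by omega) (by omega)
    have hoffb : off < ee * (N ^ ee - P) := by omega
    have hoffb' : off < (N ^ ee - P) * ee := by
      rw [Nat.mul_comm (N ^ ee - P) ee]
      exact hoffb
    have hqlt : q < N ^ ee - P := by
      rw [hq]
      exact (Nat.div_lt_iff_lt_mul heepos).mpr hoffb'
    set num : ℕ := P + q with hnum
    clear_value num
    have hcnum : pcum N num = C + ee * q := by
      have h9 := hblock q (by omega)
      rw [← hnum] at h9
      exact h9
    have hjeq : jj = pcum N num + r := by omega
    have hlen : pdlen N num = ee := pdlen_eq hN hee1 (by omega) (by omega)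
    have hnum1 : 1 ≤ num := by
      have hPpos : 0 < P := by rw [hP]; exact pow_pos (show 0 < N by omega) (ee - 1)
      omega
    have hsv : sval N jj = num / N ^ (ee - 1 - r) % N := by
      rw [← pstream_getD_sval (K := jj + 1) (by have := le_pcum N (jj + 1); omega)]
      rw [hjeq, pstream_getD (by have := le_pcum N num; omega) (by omega)]
      rw [pdigs_getD hN hnum1 (by omega), hlen]
    have e_off : ((jj : ℤ) - (C : ℤ)) = ((off : ℕ) : ℤ) := by omega
    have e_q : PySem.Int.floordiv ((off : ℕ) : ℤ) ((ee : ℕ) : ℤ) = ((q : ℕ) : ℤ) := by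
      rw [hq]; exact PySem.Int.floordiv_natCast off ee
    have e_r : PySem.Int.mod ((off : ℕ) : ℤ) ((ee : ℕ) : ℤ) = ((r : ℕ) : ℤ) := by
      rw [hr]; exact PySem.Int.mod_natCast off ee
    have e_num : ((P : ℕ) : ℤ) + ((q : ℕ) : ℤ) = ((num : ℕ) : ℤ) := by
      rw [hnum]; push_cast; ring
    have e_exp : (((ee : ℕ) : ℤ) - 1 - ((r : ℕ) : ℤ)).toNat = ee - 1 - r := by omega
    have e_pow : ((N : ℤ)) ^ (ee - 1 - r) = ((N ^ (ee - 1 - r) : ℕ) : ℤ) := by push_cast; ring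
    simp only [e_off, e_q, e_r, e_num, e_exp, e_pow, PySem.Int.floordiv_natCast,
      PySem.Int.mod_natCast]
    rw [hsv]

-- ===== the scan =====

/-- Within one inter-pick gap, A's divisibility test fires exactly at the pick position
(s is the first pick position, s ≡ p - 1 mod M). -/
lemma mod_fires_iff {M s i k : ℕ} {p : ℤ} (hM : 1 ≤ M)
    (hdvd : (M : ℤ) ∣ ((s : ℤ) - (p - 1)))
    (h1 : i ≤ s + k * M) (h2 : s + k * M < i + M) :
    (PySem.Int.mod ((i : ℤ) + 1 - p) (M : ℤ) = 0) ↔ i = s + k * M := by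
  have hM0 : (0 : ℤ) < (M : ℤ) := by exact_mod_cast hM
  have hjj : ((k * M : ℕ) : ℤ) = (M : ℤ) * (k : ℤ) := by push_cast; ring
  rw [PySem.Int.mod_eq_zero_iff_dvd]
  have key : ((M : ℤ) ∣ ((i : ℤ) + 1 - p)) ↔ ((M : ℤ) ∣ ((i : ℤ) - (s : ℤ))) := by
    constructor
    · intro h
      have h9 : (i : ℤ) - (s : ℤ) = ((i : ℤ) + 1 - p) - ((s : ℤ) - (p - 1)) := by ring
      rw [h9]
      exact dvd_sub h hdvd
    · intro h
      have h9 : (i : ℤ) + 1 - p = ((i : ℤ) - (s : ℤ)) + ((s : ℤ) - (p - 1)) := by ring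
      rw [h9]
      exact dvd_add h hdvd
  rw [key]
  constructor
  · rintro ⟨c, hc⟩
    have hub : (M : ℤ) * c ≤ (M : ℤ) * (k : ℤ) := by rw [← hc, ← hjj]; omega
    have hlb : (M : ℤ) * (k : ℤ) - (M : ℤ) < (M : ℤ) * c := by rw [← hc, ← hjj]; omega
    have h3 : c ≤ (k : ℤ) := le_of_mul_le_mul_left hub hM0
    have hck : c = (k : ℤ) := by
      rcases lt_or_eq_of_le h3 with h5 | h5
      · exfalso
        have h6 : (M : ℤ) * c ≤ (M : ℤ) * ((k : ℤ) - 1) :=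
          mul_le_mul_of_nonneg_left (by omega) (le_of_lt hM0)
        have h7 : (M : ℤ) * ((k : ℤ) - 1) = (M : ℤ) * (k : ℤ) - (M : ℤ) := by ring
        linarith
      · exact h5
    rw [hck, ← hjj] at hc
    omega
  · intro h
    refine ⟨(k : ℤ), ?_⟩
    rw [← hjj]
    omega

lemma aScan_pick {N M T K s : ℕ} {p : ℤ} (hN : 2 ≤ N) (hM : 1 ≤ M)
    (hdvd : (M : ℤ) ∣ ((s : ℤ) - (p - 1)))
    (hlast : s + (T - 1) * M < pcum N K) :
    ∀ fuel (i k : ℕ) (ans : List Char), pcum N K - i < fuel → k < T →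
      i ≤ s + k * M → s + k * M < i + M → ans.length = k →
      aScan (↑M) p (↑T) ((pstream N K).map (encV N)) (↑i) ans =
        ans ++ (List.range' k (T - k)).flatMap
          (fun q => pyStrOfVal (encV N (sval N (s + q * M)))) := by
  intro fuel
  induction fuel with
  | zero => intro i k ans hf; omega
  | succ fuel ih =>
    intro i k ans hf hk hi1 hi2 hans
    have hmono : k * M ≤ (T - 1) * M := Nat.mul_le_mul_right M (by omega)
    have hibound : i < pcum N K := by omega
    have hlen : (((pstream N K).map (encV N)).length : ℤ) = (pcum N K : ℤ) := by
      rw [List.length_map, length_pstream]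
    have hcond := mod_fires_iff (i := i) (k := k) hM hdvd hi1 hi2
    rw [aScan, dif_pos (by rw [hlen]; exact_mod_cast hibound)]
    by_cases hfire : i = s + k * M
    · simp only [if_pos (hcond.mpr hfire)]
      have hget : PySem.List.pyGetD ((pstream N K).map (encV N)) (↑i) (PyVal.i 0) =
          encV N (sval N i) := by
        rw [PySem.List.pyGetD_natCast]
        rw [List.getD_eq_getElem _ _ (by rw [List.length_map, length_pstream]; exact hibound)]
        rw [List.getElem_map]
        congr 1
        rw [← List.getD_eq_getElem _ 0 (by rw [length_pstream]; exact hibound)]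
        exact pstream_getD_sval hibound
      rw [hget]
      have hlen1 : (ans ++ pyStrOfVal (encV N (sval N i))).length = k + 1 := by
        rw [List.length_append, hans, pyStrOfVal_encV_len hN (sval_lt hN)]
      by_cases hdone : k + 1 = T
      · simp only [if_pos (show ((ans ++ pyStrOfVal (encV N (sval N i))).length : ℤ) = (T : ℤ)
          by rw [hlen1]; exact_mod_cast hdone)]
        rw [show T - k = 1 by omega]
        simp [hfire]
      · simp only [if_neg (show ¬ ((ans ++ pyStrOfVal (encV N (sval N i))).length : ℤ) = (T : ℤ)
          by rw [hlen1]; intro hc; exact hdone (by exact_mod_cast hc))]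
        have hsm : (k + 1) * M = k * M + M := Nat.succ_mul k M
        rw [show ((i : ℤ) + 1) = ((i + 1 : ℕ) : ℤ) by push_cast; ring]
        rw [ih (i + 1) (k + 1) _ (by omega) (by omega) (by omega) (by omega) hlen1]
        rw [show T - k = (T - (k + 1)) + 1 by omega, List.range'_succ, List.flatMap_cons]
        rw [hfire, List.append_assoc]
    · simp only [if_neg (fun hc => hfire (hcond.mp hc))]
      simp only [if_neg (show ¬ ((ans.length : ℤ) = (T : ℤ)) by
        rw [hans]; intro hc; exact absurd (by exact_mod_cast hc : k = T) (by omega))]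
      rw [show ((i : ℤ) + 1) = ((i + 1 : ℕ) : ℤ) by push_cast; ring]
      exact ih (i + 1) k ans (by omega) hk (by omega) (by omega) hans

-- ===== VERDICT (by name: the statement is the Claim_ definition above) =====
theorem solution_spec : Claim_equal_solution := by
  intro n t m p hDom hPre
  unfold Spec_solution
  -- the empty game: t*m ≤ 0, A builds nothing and scans nothing; B iterates range(t) = []
  have hempty : (t ≤ 0 ∧ t * m ≤ 0) → solution n t m p = solution_alt n t m p := by
    rintro ⟨ht0, hTM⟩
    show String.ofList (aScan m p t (aOuter n (t * m) 0 []) 0 []) = _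
    rw [aOuter, dif_neg (by omega : ¬ (0 : ℤ) < t * m)]
    rw [aScan, dif_neg (by simp : ¬ (0 : ℤ) < ((([] : List PyVal).length : ℕ) : ℤ))]
    show _ = String.ofList (((PySem.List.pyRange 0 t 1).map
      (fun k => bDigitAt n (PySem.Int.mod (p - 1) m + k * m))).flatten)
    rw [PySem.List.pyRange_one, show (t - 0).toNat = 0 by omega]
    simp
  rcases hPre with ⟨hm, ht0⟩ | ⟨hm, ht, hn, -⟩ | ⟨ht0, hm⟩
  · exact hempty ⟨ht0, by nlinarith⟩
  case inr.inr => exact hempty ⟨by omega, by subst ht0; simp⟩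
  -- main case: 1 ≤ m, 1 ≤ t, 2 ≤ n
  obtain ⟨N, rfl⟩ : ∃ N : ℕ, (↑N : ℤ) = n := ⟨n.toNat, Int.toNat_of_nonneg (by omega)⟩
  obtain ⟨T, rfl⟩ : ∃ T : ℕ, (↑T : ℤ) = t := ⟨t.toNat, Int.toNat_of_nonneg (by omega)⟩
  obtain ⟨M, rfl⟩ : ∃ M : ℕ, (↑M : ℤ) = m := ⟨m.toNat, Int.toNat_of_nonneg (by omega)⟩
  have hN : 2 ≤ N := by exact_mod_cast hn
  have hT : 1 ≤ T := by exact_mod_cast ht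
  have hM : 1 ≤ M := by exact_mod_cast hm
  have hM0 : (0 : ℤ) < (M : ℤ) := by exact_mod_cast hM
  -- the first pick position s = (p-1) % m
  set s : ℕ := (PySem.Int.mod (p - 1) (M : ℤ)).toNat with hs
  have hsInt : ((s : ℕ) : ℤ) = PySem.Int.mod (p - 1) (M : ℤ) := by
    rw [hs]; exact Int.toNat_of_nonneg (PySem.Int.mod_nonneg _ hM0)
  have hsM : s < M := by
    have h1 : PySem.Int.mod (p - 1) (M : ℤ) < (M : ℤ) := PySem.Int.mod_lt _ hM0
    omega
  have hdvd : (M : ℤ) ∣ ((s : ℤ) - (p - 1)) := by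
    have h1 := PySem.Int.floordiv_mul_add_mod (p - 1) (M : ℤ)
    exact ⟨-(PySem.Int.floordiv (p - 1) (M : ℤ)), by rw [hsInt]; linarith⟩
  -- Dom size bounds for bDigitAt's fuel
  unfold Dom_solution pvDomInt at hDom
  simp only [Bool.and_eq_true, decide_eq_true_eq] at hDom
  obtain ⟨⟨⟨-, hTd⟩, hMd⟩, -⟩ := hDom
  have hTb : T ≤ 2 ^ 31 + 1 := by
    have h2 : (T : ℤ) ≤ 2147483648 := hTd.2
    exact_mod_cast (by omega : (T : ℤ) ≤ ((2 ^ 31 + 1 : ℕ) : ℤ))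
  have hMb : M ≤ 2 ^ 31 + 1 := by
    have h2 : (M : ℤ) ≤ 2147483648 := hMd.2
    exact_mod_cast (by omega : (M : ℤ) ≤ ((2 ^ 31 + 1 : ℕ) : ℤ))
  set TT := T * M with hTT
  have hTT1 : 1 ≤ TT := Nat.mul_pos (by omega) (by omega)
  -- A's board
  set K := kStop N TT with hK
  have hres : aOuter (↑N) ((↑T) * (↑M)) 0 [] = (pstream N K).map (encV N) := by
    have h0 : ((pstream N 0).map (encV N) : List PyVal) = [] := by simp [pstream]
    have h9 := aOuter_spec (N := N) (TT := TT) hN hTT1 TT 0 (by omega)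
      (by omega) (by simp [pcum])
    rw [h0] at h9
    rw [show ((T : ℤ) * (M : ℤ)) = ((TT : ℕ) : ℤ) by push_cast [hTT]; ring,
      show ((0 : ℤ)) = ((0 : ℕ) : ℤ) by norm_num]
    exact h9
  have hTTcum : TT ≤ pcum N K := le_pcum_kStop N TT
  have hTm : (T - 1) * M + M = T * M := by
    have h1 : (T - 1) * M + M = (T - 1 + 1) * M := (Nat.succ_mul _ _).symm
    rw [h1, show T - 1 + 1 = T by omega]
  have hlast : s + (T - 1) * M < pcum N K := by omega
  -- positions are small enough for bDigitAt_spec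
  have hposb : ∀ q : ℕ, q < T → s + q * M < 2 ^ 120 := by
    intro q hq
    have h2 : q * M + M ≤ T * M := by
      rw [← Nat.succ_mul]
      exact Nat.mul_le_mul_right M (by omega)
    have h3 : T * M ≤ (2 ^ 31 + 1) * (2 ^ 31 + 1) := Nat.mul_le_mul hTb hMb
    have h4 : (2 ^ 31 + 1) * (2 ^ 31 + 1) < 2 ^ 120 := by norm_num
    omega
  -- A's side
  have hA : solution ↑N ↑T ↑M p =
      String.ofList (aScan ↑M p ↑T ((pstream N K).map (encV N)) ((0 : ℕ) : ℤ) []) := by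
    show String.ofList (aScan ↑M p ↑T (aOuter ↑N ((↑T) * (↑M)) 0 []) 0 []) = _
    rw [hres]
    norm_num
  rw [hA]
  rw [aScan_pick hN hM hdvd hlast (pcum N K + 1) 0 0 [] (by omega) (by omega)
    (by omega) (by omega) rfl]
  -- B's side
  show _ = String.ofList (((PySem.List.pyRange 0 ↑T 1).map
    (fun k => bDigitAt ↑N (PySem.Int.mod (p - 1) ↑M + k * ↑M))).flatten)
  rw [← hsInt]
  rw [PySem.List.pyRange_one]
  rw [show (((T : ℤ)) - 0).toNat = T by omega]
  rw [List.map_map]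
  have hmapeq : List.map ((fun k : ℤ => bDigitAt (↑N) ((↑s) + k * (↑M))) ∘ (fun k : ℕ => 0 + (k : ℤ))) (List.range T) =
      List.map (fun q : ℕ => pyStrOfVal (encV N (sval N (s + q * M)))) (List.range T) := by
    apply List.map_congr_left
    intro q hq
    have hqT : q < T := List.mem_range.mp hq
    have hcast : ((s : ℤ) + (0 + (q : ℤ)) * (M : ℤ)) = ((s + q * M : ℕ) : ℤ) := by
      push_cast
      ring
    simp only [Function.comp]
    rw [hcast, bDigitAt_spec hN (hposb q hqT), bDigitStr_encV hN]
  rw [hmapeq]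
  rw [List.nil_append, Nat.sub_zero, ← List.range_eq_range', List.flatMap_def]
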